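-- pv_equiv track=rewrite | github.com/igarashi1010/dentsu_intern_submission | work3.py | create_unique
-- ===== SOURCE A (Python) =====
-- def create_unique(allocated_vocab):
--     allocated_unique_vocab = {}
--     label_list = list(allocated_vocab.keys())
--
--     for label, vocab in allocated_vocab.items():
--         k = label_list.index(label)
--         other_labels = label_list[:k] + label_list[k+1:]
--         other_vocab = set()
--         for ol in other_labels:
--             other_vocab = other_vocab.union(allocated_vocab[ol])
--
--         unique_vocab = set()
--         for word in vocab:
--             if word in other_vocab:
--                 pass
--             else:
--                 unique_vocab.add(word)
--         allocated_unique_vocab[label] = unique_vocab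
--     return allocated_unique_vocab
-- ===== SOURCE B (Python) =====
-- def create_unique(allocated_vocab):
--     # One pass: count, for every word, in how many labels' vocabularies it occurs;
--     # a word is unique to its label iff that count is 1.
--     counts = {}
--     for vocab in allocated_vocab.values():
--         for w in set(vocab):
--             counts[w] = counts.get(w, 0) + 1
--     return {label: {w for w in vocab if counts[w] == 1}
--             for label, vocab in allocated_vocab.items()}
-- ===== Notes on version B (the rewrite author's own statement) =====
-- stated objective: faster
-- what changed: Instead of rebuilding, for every label, the union of all other labels' vocabularies (quadratic in the number of labels), B counts in one pass how many labels contain each word and keeps a word iff its label-count is 1.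
import Mathlib
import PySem

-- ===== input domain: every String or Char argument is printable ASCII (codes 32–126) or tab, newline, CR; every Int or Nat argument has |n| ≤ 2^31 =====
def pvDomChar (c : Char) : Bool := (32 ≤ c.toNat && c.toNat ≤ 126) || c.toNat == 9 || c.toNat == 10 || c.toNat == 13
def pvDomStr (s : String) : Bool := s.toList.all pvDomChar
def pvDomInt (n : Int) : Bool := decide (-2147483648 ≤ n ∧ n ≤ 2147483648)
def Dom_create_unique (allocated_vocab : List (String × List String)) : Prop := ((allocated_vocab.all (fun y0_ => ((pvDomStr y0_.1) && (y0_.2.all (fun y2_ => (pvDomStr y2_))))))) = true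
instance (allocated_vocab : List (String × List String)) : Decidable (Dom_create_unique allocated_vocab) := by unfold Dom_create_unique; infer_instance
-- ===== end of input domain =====

-- B replaces A's per-label union over all OTHER labels' vocabularies (quadratic in the
-- number of labels) by one pass counting labels-per-word, keeping words with count 1.
-- The argument is a Python dict: both ports first read the association list the way
-- dict(pairs) does (PySem.Dict.ofList: later duplicate keys overwrite, position kept).

-- ===== PORT A =====
-- other_vocab of one label: union of allocated_vocab[ol] over other_labels
-- (label is always a key, so `.index` and the `allocated_vocab[ol]` lookups cannot fail;
--  they are ported with `.getD 0` / `.getD ol []`, exact on keys that are present).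
def pvOtherVocab (d : PySem.Dict String (List String)) (label_list : List String)
    (label : String) : PySem.Set String :=
  let k : Nat := (PySem.List.index? label_list label).getD 0
  let other_labels := PySem.List.slice label_list none (some (k : Int)) ++
                      PySem.List.slice label_list (some ((k : Int) + 1)) none
  other_labels.foldl (fun s ol => PySem.Set.union s (d.getD ol [])) PySem.Set.empty

-- the body of A's outer loop: the set of words of `lv.2` not in the other labels' union
def pvAUnique (d : PySem.Dict String (List String)) (label_list : List String)
    (lv : String × List String) : PySem.Set String :=
  let other_vocab := pvOtherVocab d label_list lv.1
  lv.2.foldl (fun u w => if other_vocab.contains w then u else PySem.Set.add u w)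
    PySem.Set.empty

def create_unique (allocated_vocab : List (String × List String)) :
    List (String × List String) :=
  let d := PySem.Dict.ofList allocated_vocab
  let label_list := d.keys
  (d.items.foldl
      (fun (acc : PySem.Dict String (List String)) lv =>
        acc.insert lv.1 (pvAUnique d label_list lv))
      PySem.Dict.empty).items

-- ===== PORT B =====
def create_unique_alt (allocated_vocab : List (String × List String)) :
    List (String × List String) :=
  let d := PySem.Dict.ofList allocated_vocab
  -- counts[w] = in how many labels' vocabularies w occurs
  let counts : PySem.Dict String Int :=
    d.values.foldl
      (fun c v => (PySem.Set.ofList v).foldl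
        (fun c w => c.insert w (c.getD w 0 + 1)) c)
      PySem.Dict.empty
  d.items.map (fun lv =>
    (lv.1, lv.2.foldl
      (fun (u : PySem.Set String) w => if counts.getD w 0 = 1 then PySem.Set.add u w else u)
      PySem.Set.empty))

-- ===== PRECONDITION & SPEC =====
def Spec_create_unique (allocated_vocab : List (String × List String)) (out : List (String × List String)) : Prop := out = create_unique_alt allocated_vocab
instance (allocated_vocab : List (String × List String)) (out : List (String × List String)) : Decidable (Spec_create_unique allocated_vocab out) := by unfold Spec_create_unique; infer_instance

-- ===== CLAIM (what is proved, stated in full; the proofs are below) =====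
def Claim_equal_create_unique : Prop := ∀ (allocated_vocab : List (String × List String)), Dom_create_unique allocated_vocab → Spec_create_unique allocated_vocab (create_unique allocated_vocab)

-- ===== LEMMAS AND PROOFS =====

-- membership in A's running union over the other labels
lemma pv_mem_foldl_union (ls : List String) (d : PySem.Dict String (List String))
    (s : PySem.Set String) (w : String) :
    w ∈ ls.foldl (fun s ol => PySem.Set.union s (d.getD ol [])) s ↔
      w ∈ s ∨ ∃ ol ∈ ls, w ∈ d.getD ol [] := by
  induction ls generalizing s with
  | nil => simp
  | cons ol ls ih =>
    simp only [List.foldl_cons, ih, PySem.Set.mem_union]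
    constructor
    · rintro ((h | h) | ⟨x, hx, hw⟩)
      · exact Or.inl h
      · exact Or.inr ⟨ol, by simp, h⟩
      · exact Or.inr ⟨x, by simp [hx], hw⟩
    · rintro (h | ⟨x, hx, hw⟩)
      · exact Or.inl (Or.inl h)
      · rcases List.mem_cons.mp hx with rfl | hx
        · exact Or.inl (Or.inr hw)
        · exact Or.inr ⟨x, hx, hw⟩

-- A's other_labels (= label_list[:k] + label_list[k+1:] at k = index of l) are,
-- for a duplicate-free label_list, exactly the labels other than l
lemma pv_mem_other_labels (xs : List String) (l y : String)
    (hnd : xs.Nodup) (hl : l ∈ xs) :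
    (y ∈ PySem.List.slice xs none (some (((PySem.List.index? xs l).getD 0 : Nat) : Int)) ++
         PySem.List.slice xs (some ((((PySem.List.index? xs l).getD 0 : Nat) : Int) + 1)) none)
      ↔ (y ∈ xs ∧ y ≠ l) := by
  obtain ⟨k, hk⟩ : ∃ k, PySem.List.index? xs l = some k := by
    cases h : PySem.List.index? xs l with
    | none => exact absurd ((PySem.List.index?_eq_none_iff xs l).mp h) (by simpa using hl)
    | some k => exact ⟨k, rfl⟩
  obtain ⟨pre, suf, rfl, hlen, -⟩ := (PySem.List.index?_eq_some_iff _ _ _).mp hk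
  rw [hk]
  simp only [Option.getD_some]
  have h1 : PySem.List.slice (pre ++ l :: suf) none (some ((k : Nat) : Int)) = pre := by
    rw [PySem.List.slice_to _ (by positivity)]
    simpa using List.take_left' hlen
  have h2 : PySem.List.slice (pre ++ l :: suf) (some (((k : Nat) : Int) + 1)) none = suf := by
    rw [show ((k : Nat) : Int) + 1 = ((k + 1 : Nat) : Int) by omega]
    rw [PySem.List.slice_from _ (by positivity)]
    have : pre ++ l :: suf = (pre ++ [l]) ++ suf := by simp
    rw [this, Int.toNat_natCast, List.drop_left' (by simp [hlen])]
  rw [h1, h2]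
  have hnd' := hnd
  simp only [List.nodup_append, List.nodup_cons, List.mem_cons] at hnd'
  have hpre : l ∉ pre := fun hmem => hnd'.2.2 l hmem l (Or.inl rfl) rfl
  have hsuf : l ∉ suf := hnd'.2.1.1
  constructor
  · intro hy
    rcases List.mem_append.mp hy with h | h
    · exact ⟨by simp [h], fun e => hpre (e ▸ h)⟩
    · exact ⟨by simp [h], fun e => hsuf (e ▸ h)⟩
  · rintro ⟨hy, hne⟩
    rcases List.mem_append.mp hy with h | h
    · exact List.mem_append.mpr (Or.inl h)
    · rcases List.mem_cons.mp h with rfl | h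
      · exact absurd rfl hne
      · exact List.mem_append.mpr (Or.inr h)

-- B's counter: after the counting pass, counts[w] is the number of vocabularies containing w
lemma pv_counts_getD (vs : List (List String)) (c : PySem.Dict String Int) (w : String) :
    (vs.foldl
        (fun c v => (PySem.Set.ofList v).foldl
          (fun c w => c.insert w (c.getD w 0 + 1)) c) c).getD w 0
      = c.getD w 0 + (vs.countP (fun v => decide (w ∈ v)) : Int) := by
  induction vs generalizing c with
  | nil => simp
  | cons v vs ih =>
    rw [List.foldl_cons, ih, PySem.Dict.getD_foldl_insert_add_one, List.countP_cons]
    by_cases hw : w ∈ v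
    · rw [List.count_eq_one_of_mem (PySem.Set.nodup_ofList v)
        ((PySem.Set.mem_ofList v w).mpr hw)]
      simp [hw]
      ring
    · have : List.count w (PySem.Set.ofList v) = 0 := by
        simp [List.count_eq_zero, PySem.Set.mem_ofList, hw]
      simp [this, hw]

-- with duplicate-free labels: a word of lv's vocabulary is counted exactly once
-- iff no entry with another label contains it
lemma pv_countP_eq_one_iff (items : List (String × List String))
    (hnd : (items.map Prod.fst).Nodup) (lv : String × List String) (hlv : lv ∈ items)
    (w : String) (hw : w ∈ lv.2) :
    items.countP (fun p => decide (w ∈ p.2)) = 1 ↔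
      ¬ ∃ p ∈ items, p.1 ≠ lv.1 ∧ w ∈ p.2 := by
  obtain ⟨s, t, rfl⟩ := List.append_of_mem hlv
  have hs : lv.1 ∉ s.map Prod.fst ∧ lv.1 ∉ t.map Prod.fst := by
    rw [List.map_append, List.map_cons, List.nodup_append] at hnd
    obtain ⟨-, h2, hdisj⟩ := hnd
    exact ⟨fun h => hdisj _ h lv.1 (List.mem_cons_self) rfl, (List.nodup_cons.mp h2).1⟩
  have hcnt : (s ++ lv :: t).countP (fun p => decide (w ∈ p.2)) =
      s.countP (fun p => decide (w ∈ p.2)) + t.countP (fun p => decide (w ∈ p.2)) + 1 := by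
    rw [List.countP_append, List.countP_cons]
    simp [hw]; ring
  rw [hcnt]
  constructor
  · intro h1 ⟨p, hp, hne, hwp⟩  -- count is 1, yet some other entry contains w: impossible
    have hz : s.countP (fun p => decide (w ∈ p.2)) = 0 ∧
        t.countP (fun p => decide (w ∈ p.2)) = 0 := by omega
    rcases List.mem_append.mp hp with h | h
    · have hno := List.countP_eq_zero.mp hz.1 p h
      simp only [decide_eq_true_eq] at hno
      exact hno hwp
    · rcases List.mem_cons.mp h with rfl | h
      · exact hne rfl
      · have hno := List.countP_eq_zero.mp hz.2 p h
        simp only [decide_eq_true_eq] at hno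
        exact hno hwp
  · intro h
    have hz1 : s.countP (fun p => decide (w ∈ p.2)) = 0 := by
      rw [List.countP_eq_zero]
      intro p hp
      simp only [decide_eq_true_eq]
      intro hwp
      have hm : p.1 ∈ s.map Prod.fst := List.mem_map_of_mem hp
      exact h ⟨p, List.mem_append.mpr (Or.inl hp), fun e => hs.1 (e ▸ hm), hwp⟩
    have hz2 : t.countP (fun p => decide (w ∈ p.2)) = 0 := by
      rw [List.countP_eq_zero]
      intro p hp
      simp only [decide_eq_true_eq]
      intro hwp
      have hm : p.1 ∈ t.map Prod.fst := List.mem_map_of_mem hp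
      exact h ⟨p, List.mem_append.mpr (Or.inr (List.mem_cons_of_mem _ hp)), fun e => hs.2 (e ▸ hm), hwp⟩
    omega

-- per-entry agreement: A's "not in any other label's vocabulary" test and
-- B's "counted exactly once" test select the same words of lv's vocabulary
lemma pv_cond_iff (d : PySem.Dict String (List String)) (lv : String × List String)
    (hlv : lv ∈ d.items) (hnd : d.keys.Nodup) (w : String) (hw : w ∈ lv.2) :
    ((pvOtherVocab d d.keys lv.1).contains w = true ↔
      ¬ (d.values.foldl
          (fun (c : PySem.Dict String Int) v => (PySem.Set.ofList v).foldl
            (fun c w => c.insert w (c.getD w 0 + 1)) c) PySem.Dict.empty).getD w 0 = 1) := by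
  have hmemk : lv.1 ∈ d.keys := PySem.Dict.mem_keys_of_mem_items d hlv
  have hitems : d.items = d.keys.map (fun k => (k, d.getD k [])) :=
    PySem.Dict.items_eq_map_keys d hnd []
  have hA : (pvOtherVocab d d.keys lv.1).contains w = true ↔
      ∃ p ∈ d.items, p.1 ≠ lv.1 ∧ w ∈ p.2 := by
    rw [PySem.Set.contains_iff]
    unfold pvOtherVocab
    rw [pv_mem_foldl_union]
    simp only [PySem.Set.empty, List.not_mem_nil, false_or]
    constructor
    · rintro ⟨ol, hol, hwol⟩
      have := (pv_mem_other_labels d.keys lv.1 ol hnd hmemk).mp hol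
      refine ⟨(ol, d.getD ol []), ?_, this.2, hwol⟩
      rw [hitems]
      exact List.mem_map_of_mem this.1
    · rintro ⟨p, hp, hne, hwp⟩
      rw [hitems] at hp
      obtain ⟨k, hk, rfl⟩ := List.mem_map.mp hp
      exact ⟨k, (pv_mem_other_labels d.keys lv.1 k hnd hmemk).mpr ⟨hk, hne⟩, hwp⟩
  have hB : (d.values.foldl
        (fun (c : PySem.Dict String Int) v => (PySem.Set.ofList v).foldl
          (fun c w => c.insert w (c.getD w 0 + 1)) c) PySem.Dict.empty).getD w 0 = 1 ↔
      ¬ ∃ p ∈ d.items, p.1 ≠ lv.1 ∧ w ∈ p.2 := by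
    rw [pv_counts_getD, PySem.Dict.getD_empty, zero_add, Nat.cast_eq_one]
    have hv : d.values = d.items.map Prod.snd := rfl
    rw [hv, List.countP_map]
    have hkeys : (d.items.map Prod.fst).Nodup := hnd
    exact pv_countP_eq_one_iff d.items hkeys lv hlv w hw
  rw [hA, hB]
  exact not_not.symm

-- ===== VERDICT (by name: the statement is the Claim_ definition above) =====
theorem create_unique_spec : Claim_equal_create_unique := by
  intro av _hdom
  unfold Spec_create_unique create_unique create_unique_alt
  have hnd : (PySem.Dict.ofList av).keys.Nodup := PySem.Dict.nodup_keys_ofList av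
  set d := PySem.Dict.ofList av with hd
  rw [PySem.Dict.items_foldl_insert_fresh d.items Prod.fst
        (fun lv => pvAUnique d d.keys lv) PySem.Dict.empty
        (fun a _ => PySem.Dict.contains_empty a.1) hnd]
  show [] ++ d.items.map (fun lv => (lv.1, pvAUnique d d.keys lv)) = _
  rw [List.nil_append]
  apply List.map_congr_left
  intro lv hlv
  refine Prod.ext rfl ?_
  unfold pvAUnique
  apply PySem.List.foldl_congr_mem'
  intro w hw u
  have hiff := pv_cond_iff d lv hlv hnd w hw
  by_cases hb : (pvOtherVocab d d.keys lv.1).contains w = true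
  · rw [if_pos hb, if_neg (hiff.mp hb)]
  · rw [if_neg hb, if_pos (by by_contra hc; exact hb (hiff.mpr hc))]
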